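-- pv_equiv track=rewrite | github.com/ebonian/compprog | examples/grader/9/Fill_In_Numbers.py | pattern4
-- ===== SOURCE A (Python) =====
-- def pattern4(N):
--     c=1
--     ans=[]
--     for i in range(N):
--         temp=[]
--         for j in range(N):
--             if j<i: temp.append(0)
--             elif i==0:
--                 temp.append((c*(c+1))//2)
--                 c+=1
--             else:
--                 temp.append(ans[i-1][j-1]+j)
--         ans.append(temp)
--     return ans
-- ===== SOURCE B (Python) =====
-- def pattern4(N):
--     # closed form per cell: no running counter, no dependence on the previous row
--     return [[0 if j < i else (j - i + 1) * (j - i + 2) // 2 + i * j - i * (i - 1) // 2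
--              for j in range(N)]
--             for i in range(N)]
-- ===== Notes on version B (the rewrite author's own statement) =====
-- stated objective: simpler
-- what changed: B computes every cell independently from a closed-form triangular-number formula in only i and j, eliminating A's running counter and the recurrence on the previous row.
import Mathlib
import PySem

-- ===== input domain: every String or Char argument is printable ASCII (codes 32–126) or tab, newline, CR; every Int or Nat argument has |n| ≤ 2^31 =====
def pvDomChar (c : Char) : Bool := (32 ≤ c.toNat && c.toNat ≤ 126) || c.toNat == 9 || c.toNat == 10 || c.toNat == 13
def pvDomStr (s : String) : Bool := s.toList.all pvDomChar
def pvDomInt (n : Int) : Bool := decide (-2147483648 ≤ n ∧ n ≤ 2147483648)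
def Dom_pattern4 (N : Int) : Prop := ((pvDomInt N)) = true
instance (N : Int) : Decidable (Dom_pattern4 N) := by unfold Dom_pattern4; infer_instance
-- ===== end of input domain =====

-- B replaces A's running counter and previous-row recurrence by a per-cell closed form (simpler).


-- ===== PORT A =====
-- literal transliteration of A: outer fold over range(N) carrying (c, ans);
-- inner fold over range(N) carrying (temp, c); ans[i-1][j-1] via pyGetD (in-range whenever reached)
def pattern4 (N : Int) : List (List Int) :=
  let s := (PySem.List.pyRange 0 N 1).foldl
    (fun (st : Int × List (List Int)) i =>
      let inner := (PySem.List.pyRange 0 N 1).foldl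
        (fun (t : List Int × Int) j =>
          if j < i then (t.1 ++ [0], t.2)
          else if i = 0 then (t.1 ++ [PySem.Int.floordiv (t.2 * (t.2 + 1)) 2], t.2 + 1)
          else (t.1 ++ [PySem.List.pyGetD (PySem.List.pyGetD st.2 (i - 1) []) (j - 1) 0 + j], t.2))
        ([], st.1)
      (inner.2, st.2 ++ [inner.1]))
    (1, [])
  s.2

-- ===== PORT B =====
-- literal transliteration of B: each cell from only i and j
def pattern4_alt (N : Int) : List (List Int) :=
  (PySem.List.pyRange 0 N 1).map (fun i =>
    (PySem.List.pyRange 0 N 1).map (fun j =>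
      if j < i then 0
      else PySem.Int.floordiv ((j - i + 1) * (j - i + 2)) 2 + i * j
             - PySem.Int.floordiv (i * (i - 1)) 2))

-- ===== PRECONDITION & SPEC =====
def Spec_pattern4 (N : Int) (out : List (List Int)) : Prop := out = pattern4_alt N
instance (N : Int) (out : List (List Int)) : Decidable (Spec_pattern4 N out) := by unfold Spec_pattern4; infer_instance

-- ===== CLAIM (what is proved, stated in full; the proofs are below) =====
def Claim_equal_pattern4 : Prop := ∀ (N : Int), Dom_pattern4 N → Spec_pattern4 N (pattern4 N)

-- ===== LEMMAS AND PROOFS =====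

-- B's cell value
def pvCell (i j : Int) : Int :=
  if j < i then 0
  else PySem.Int.floordiv ((j - i + 1) * (j - i + 2)) 2 + i * j
         - PySem.Int.floordiv (i * (i - 1)) 2

-- the recurrence step matches the closed form
lemma pvCell_step (i j : Int) (hj : i ≤ j) :
    pvCell (i - 1) (j - 1) + j = pvCell i j := by
  unfold pvCell
  rw [if_neg (by omega), if_neg (by omega)]
  simp only [PySem.Int.floordiv_eq_ediv_of_pos (by omega : (0:Int) < 2)]
  have h1 : (j - 1 - (i - 1) + 1) * (j - 1 - (i - 1) + 2) = (j - i + 1) * (j - i + 2) := by ring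
  have h2' : (i - 1) * (i - 1 - 1) = (i - 1) * (i - 2) := by ring
  have h2 : i * (i - 1) = (i - 1) * (i - 2) + (i - 1) * 2 := by ring
  have h3 : ((i - 1) * (i - 2) + (i - 1) * 2) / 2 = (i - 1) * (i - 2) / 2 + (i - 1) :=
    Int.add_mul_ediv_right _ _ (by omega)
  rw [h1, h2', h2, h3]; ring

-- inner loop, row 0: running counter c (third branch never taken; kept generic as g)
lemma pvRow0 (g : List Int × Int → Int → List Int × Int) :
    ∀ (n : Nat) (acc : List Int) (c : Int),
      (PySem.List.pyRange 0 (n : Int) 1).foldl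
        (fun (t : List Int × Int) j =>
          if j < (0 : Int) then (t.1 ++ [0], t.2)
          else if (0 : Int) = 0 then (t.1 ++ [PySem.Int.floordiv (t.2 * (t.2 + 1)) 2], t.2 + 1)
          else g t j) (acc, c)
      = (acc ++ (PySem.List.pyRange 0 (n : Int) 1).map
          (fun j => PySem.Int.floordiv ((c + j) * (c + j + 1)) 2), c + n) := by
  intro n
  induction n with
  | zero => intro acc c; simp [PySem.List.pyRange_one_eq_nil]
  | succ m ih =>
      intro acc c
      rw [show ((m + 1 : Nat) : Int) = (m : Int) + 1 by push_cast; ring,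
          PySem.List.pyRange_one_succ_right (Int.natCast_nonneg m),
          List.foldl_append, List.map_append, ih]
      simp only [List.foldl_cons, List.foldl_nil]
      rw [if_neg (by omega)]
      simp only [if_true, List.map_cons, List.map_nil, List.append_assoc, Prod.mk.injEq]
      exact ⟨trivial, by ring⟩

-- inner loop, row i ≥ 1: reads the previous row
lemma pvRowI (N : Int) (i : Int) (hi : 1 ≤ i) :
    ∀ (n : Nat) (hn : (n : Int) ≤ N) (acc : List Int) (c : Int),
      (PySem.List.pyRange 0 (n : Int) 1).foldl
        (fun (t : List Int × Int) j =>
          if j < i then (t.1 ++ [0], t.2)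
          else if i = 0 then (t.1 ++ [PySem.Int.floordiv (t.2 * (t.2 + 1)) 2], t.2 + 1)
          else (t.1 ++ [PySem.List.pyGetD ((PySem.List.pyRange 0 N 1).map (pvCell (i - 1))) (j - 1) 0 + j], t.2))
        (acc, c)
      = (acc ++ (PySem.List.pyRange 0 (n : Int) 1).map (pvCell i), c) := by
  intro n
  induction n with
  | zero => intro _ acc c; simp [PySem.List.pyRange_one_eq_nil]
  | succ m ih =>
      intro hn acc c
      rw [show ((m + 1 : Nat) : Int) = (m : Int) + 1 by push_cast; ring,
          PySem.List.pyRange_one_succ_right (Int.natCast_nonneg m),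
          List.foldl_append, List.map_append, ih (by omega)]
      simp only [List.foldl_cons, List.foldl_nil]
      by_cases hm : (m : Int) < i
      · rw [if_pos hm]
        simp [pvCell, if_pos hm]
      · rw [if_neg hm, if_neg (by omega),
            PySem.List.pyGetD_map_pyRange_of_nonneg _ _ _ _ (by omega) (by omega)]
        have hstep : pvCell (i - 1) ((m : Int) - 1) + (m : Int) = pvCell i (m : Int) :=
          pvCell_step i (m : Int) (by omega)
        have hc : pvCell i (m : Int) =
            (if (m : Int) < i then 0 else pvCell (i - 1) ((m : Int) - 1) + (m : Int)) := by
          rw [if_neg hm, hstep]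
        simp [List.append_assoc, ← hstep]

-- outer loop invariant
lemma pvOuter (N : Int) :
    ∀ (n : Nat), (n : Int) ≤ N →
      (PySem.List.pyRange 0 (n : Int) 1).foldl
        (fun (st : Int × List (List Int)) i =>
          let inner := (PySem.List.pyRange 0 N 1).foldl
            (fun (t : List Int × Int) j =>
              if j < i then (t.1 ++ [0], t.2)
              else if i = 0 then (t.1 ++ [PySem.Int.floordiv (t.2 * (t.2 + 1)) 2], t.2 + 1)
              else (t.1 ++ [PySem.List.pyGetD (PySem.List.pyGetD st.2 (i - 1) []) (j - 1) 0 + j], t.2))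
            ([], st.1)
          (inner.2, st.2 ++ [inner.1]))
        (1, [])
      = (if n = 0 then 1 else 1 + N,
         (PySem.List.pyRange 0 (n : Int) 1).map
           (fun i => (PySem.List.pyRange 0 N 1).map (pvCell i))) := by
  intro n
  induction n with
  | zero => intro _; simp [PySem.List.pyRange_one_eq_nil]
  | succ m ih =>
      intro hn
      have hN0 : 0 ≤ N := by omega
      have hNr : PySem.List.pyRange 0 N = PySem.List.pyRange 0 ((N.toNat : Nat) : Int) := by
        rw [Int.toNat_of_nonneg hN0]
      rw [show ((m + 1 : Nat) : Int) = (m : Int) + 1 by push_cast; ring,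
          PySem.List.pyRange_one_succ_right (Int.natCast_nonneg m),
          List.foldl_append, List.map_append, ih (by omega)]
      simp only [List.foldl_cons, List.foldl_nil]
      by_cases hm : m = 0
      · subst hm
        rw [show ((0 : Nat) : Int) = (0 : Int) by norm_num, hNr, pvRow0]
        have hcell : ∀ j ∈ PySem.List.pyRange 0 ((N.toNat : Nat) : Int),
            PySem.Int.floordiv ((1 + j) * (1 + j + 1)) 2 = pvCell 0 j := by
          intro j hj
          have hj0 : 0 ≤ j := (PySem.List.mem_pyRange_one.mp hj).1
          unfold pvCell
          rw [if_neg (by omega)]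
          have h0 : PySem.Int.floordiv (0 * ((0:Int) - 1)) 2 = 0 := by decide
          have harg : (1 + j) * (1 + j + 1) = (j - 0 + 1) * (j - 0 + 2) := by ring
          rw [harg, h0]; ring
        rw [show (if (0:Nat) = 0 then (1:Int) else 1 + N) = 1 from rfl,
            List.map_congr_left hcell]
        simp [PySem.List.pyRange_one_eq_nil (le_refl (0:Int))]
        exact hN0
      · have hm1 : 1 ≤ (m : Int) := by omega
        rw [if_neg hm]
        have hprev : PySem.List.pyGetD
            ((PySem.List.pyRange 0 (m : Int) 1).map
              (fun i => (PySem.List.pyRange 0 N 1).map (pvCell i))) ((m : Int) - 1) []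
            = (PySem.List.pyRange 0 N 1).map (pvCell ((m : Int) - 1)) :=
          PySem.List.pyGetD_map_pyRange_of_nonneg _ _ _ _ (by omega) (by omega)
        simp only [hprev]
        rw [hNr, pvRowI ((N.toNat : Nat) : Int) (m : Int) hm1 N.toNat (le_refl _)]
        simp

theorem pattern4_eq (N : Int) : pattern4 N = pattern4_alt N := by
  unfold pattern4 pattern4_alt
  by_cases hN : N ≤ 0
  · rw [PySem.List.pyRange_one_eq_nil hN]; rfl
  · have hN0 : 0 ≤ N := by omega
    have hNr : PySem.List.pyRange 0 N = PySem.List.pyRange 0 ((N.toNat : Nat) : Int) := by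
      rw [Int.toNat_of_nonneg hN0]
    rw [hNr, pvOuter ((N.toNat : Nat) : Int) N.toNat (le_refl _)]
    simp [pvCell]

-- ===== VERDICT (by name: the statement is the Claim_ definition above) =====
theorem pattern4_spec : Claim_equal_pattern4 := by
  intro N _
  unfold Spec_pattern4
  exact pattern4_eq N
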